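-- pv_equiv track=rewrite | github.com/broadinstitute/hidive | src/pydive/src/construct_graph.py | mapping_info
-- ===== SOURCE A (Python) =====
-- from collections import defaultdict
--
-- def mapping_info(AnchorInfo, contig, k):
--     anchor_list = list(AnchorInfo.keys())
--     Anchorseq = {AnchorInfo[anchor]['seq']:anchor for anchor in anchor_list}
--
--     seqlist = Anchorseq.keys()
--     PositionDict = defaultdict(list)
--     for anchor_seq in seqlist:
--         anchor_rev = ''.join([{'A':'T','C':'G','G':'C','T':'A'}[base] for base in reversed(anchor_seq)])
--         PositionDict[anchor_seq]
--         PositionDict[anchor_rev]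
--
--     for i in range(1, len(contig) - k + 1):
--         kmer = contig[i:i+k]
--         if kmer in PositionDict:
--             PositionDict[kmer] = PositionDict.get(kmer, []) + [i]
--
--     A = {}
--     SVs = {}
--     for anchor, D in AnchorInfo.items():
--         anchor_seq = D['seq']
--         #anchor_rev = ''.join([{'A':'T','C':'G','G':'C','T':'A'}[base] for base in reversed(anchor_seq)])
--         poslist = PositionDict[anchor_seq] #  + PositionDict[anchor_rev]
--         if len(poslist) == 1:
--             A[anchor] = poslist[0]
--         else:
--             SVs[anchor] = poslist
--
--     return A, SVs
-- ===== SOURCE B (Python) =====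
-- def _occurrences(contig, s, k):
--     # all positions i with 1 <= i and contig[i:i+k] == s, found via C-level str.find
--     if len(s) != k:
--         return []
--     hits = []
--     i = contig.find(s, 1)
--     while i != -1:
--         hits.append(i)
--         i = contig.find(s, i + 1)
--     return hits
--
-- def mapping_info(AnchorInfo, contig, k):
--     A = {}
--     SVs = {}
--     for anchor, D in AnchorInfo.items():
--         poslist = _occurrences(contig, D['seq'], k)
--         if len(poslist) == 1:
--             A[anchor] = poslist[0]
--         else:
--             SVs[anchor] = poslist
--     return A, SVs
-- ===== Notes on version B (the rewrite author's own statement) =====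
-- stated objective: alternative
-- what changed: A builds a defaultdict keyed by every anchor seq and its reverse complement and makes one membership-tested scan over all contig positions appending hits; B drops the position dict and the never-read reverse-complement table entirely and instead enumerates each anchor seq's occurrence positions directly with repeated contig.find(seq, start), then classifies per anchor.
-- outside the precondition, e.g. on mapping_info({'x': {'seq': 'A'}}, 'TAA', -2): A returns ({'x': 1}, {}), B returns ({}, {'x': []}); on mapping_info({'x': {'seq': ''}}, 'A', -1): A returns ({}, {'x': [1, 2]}), B returns ({}, {'x': []})
import Mathlib
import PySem

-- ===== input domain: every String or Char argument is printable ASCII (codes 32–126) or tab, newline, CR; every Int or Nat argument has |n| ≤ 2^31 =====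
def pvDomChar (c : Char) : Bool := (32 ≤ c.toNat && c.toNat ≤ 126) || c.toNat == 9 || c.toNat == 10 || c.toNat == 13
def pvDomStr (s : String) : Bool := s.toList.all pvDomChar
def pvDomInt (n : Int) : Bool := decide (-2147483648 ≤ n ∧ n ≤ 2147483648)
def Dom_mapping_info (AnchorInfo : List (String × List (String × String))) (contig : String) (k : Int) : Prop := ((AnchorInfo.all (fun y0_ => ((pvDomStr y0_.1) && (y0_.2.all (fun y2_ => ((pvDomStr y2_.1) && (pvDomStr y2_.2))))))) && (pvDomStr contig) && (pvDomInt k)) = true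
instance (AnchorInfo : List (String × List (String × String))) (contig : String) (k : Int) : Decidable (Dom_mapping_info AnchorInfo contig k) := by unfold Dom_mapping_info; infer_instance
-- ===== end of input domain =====

-- B replaces A's single dict-membership scan over all contig positions (plus a reverse-complement
-- key table whose values are never read) by a direct per-anchor enumeration of occurrences via
-- str.find; equivalence is proved on k ≥ 1 with distinct anchor keys and present, ACGT-only seqs.

-- ===== PORT A =====
-- D['seq'] (first match; a missing 'seq' key is a KeyError in Python, excluded by Pre_)
def pvSeqOf (D : List (String × String)) : String :=
  ((D.find? (fun q => q.1 == "seq")).map (fun q => q.2)).getD ""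

-- {'A':'T','C':'G','G':'C','T':'A'}[base] for base in reversed(s); any other base is a KeyError
-- in Python (excluded by Pre_) — the '?' value is never read by the rest of the program.
def pvRevComp (cs : List Char) : List Char :=
  cs.reverse.map (fun b =>
    if b = 'A' then 'T' else if b = 'C' then 'G' else if b = 'G' then 'C'
    else if b = 'T' then 'A' else '?')

-- one step of A's scan: kmer = contig[i:i+k]; if kmer in PositionDict: append i to its list
def pvScanStep (c : List Char) (k : Int) (d : PySem.Dict (List Char) (List Int)) (i : Int) :
    PySem.Dict (List Char) (List Int) :=
  if d.contains (PySem.List.slice c (some i) (some (i + k)))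
  then d.insert (PySem.List.slice c (some i) (some (i + k)))
         (d.getD (PySem.List.slice c (some i) (some (i + k))) [] ++ [i])
  else d

-- the classification step shared verbatim by both Pythons: len(poslist)==1 → A, else → SVs
def pvClassStep (acc : PySem.Dict String Int × PySem.Dict String (List Int))
    (anchor : String) (poslist : List Int) :
    PySem.Dict String Int × PySem.Dict String (List Int) :=
  if poslist.length = 1 then (acc.1.insert anchor (poslist.getD 0 0), acc.2)
  else (acc.1, acc.2.insert anchor poslist)

def mapping_info (AnchorInfo : List (String × List (String × String))) (contig : String) (k : Int) :
    (List (String × Int)) × (List (String × List Int)) :=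
  let AI : PySem.Dict String (List (String × String)) := PySem.Dict.mk AnchorInfo
  let anchor_list := AI.keys
  let Anchorseq : PySem.Dict String String :=
    anchor_list.foldl (fun d anchor => d.insert (pvSeqOf ((AI.get? anchor).getD [])) anchor)
      PySem.Dict.empty
  let seqlist := Anchorseq.keys
  let PD0 : PySem.Dict (List Char) (List Int) :=
    seqlist.foldl (fun d s => (d.setdefault s.toList []).setdefault (pvRevComp s.toList) [])
      PySem.Dict.empty
  let n : Int := (contig.toList.length : Int)
  let PD := (PySem.List.pyRange 1 (n - k + 1)).foldl (pvScanStep contig.toList k) PD0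
  let AS := AI.items.foldl
    (fun acc p => pvClassStep acc p.1 (PD.getD (pvSeqOf p.2).toList []))
    (PySem.Dict.empty, PySem.Dict.empty)
  (AS.1.items, AS.2.items)

-- ===== PORT B =====
-- the while-loop of Source B's _occurrences: i = contig.find(s, start); while i != -1: hits.append(i); …
-- fuel = len(contig)+1 bounds the trip count (each found index is ≥ the previous start) and is the
-- only change needed to make the while loop structural; it never cuts the loop short.
def pvFindAll (c s : List Char) : Int → Nat → List Int
  | _, 0 => []
  | start, fuel + 1 =>
    let i := PySem.Chars.findFrom c s start
    if i = -1 then [] else i :: pvFindAll c s (i + 1) fuel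

def pvOccurrences (c s : List Char) (k : Int) : List Int :=
  if (s.length : Int) ≠ k then [] else pvFindAll c s 1 (c.length + 1)

def mapping_info_alt (AnchorInfo : List (String × List (String × String))) (contig : String) (k : Int) :
    (List (String × Int)) × (List (String × List Int)) :=
  let AS := AnchorInfo.foldl
    (fun acc p => pvClassStep acc p.1 (pvOccurrences contig.toList (pvSeqOf p.2).toList k))
    (PySem.Dict.empty, PySem.Dict.empty)
  (AS.1.items, AS.2.items)

-- ===== PRECONDITION & SPEC =====
def pvACGT (s : String) : Bool := s.toList.all (fun ch => ch == 'A' || ch == 'C' || ch == 'G' || ch == 'T')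

-- Pre_ excludes: duplicate anchor keys, which no Python dict can hold; anchors whose inner dict
-- lacks 'seq' or whose seq has a non-ACGT base, where A raises KeyError; and, only when k < 0
-- (outside the k-mer domain, where contig[i:i+k] degenerates to Python's negative-stop slices),
-- the inputs on which some anchor seq occurs in contig (or is empty), where A's accidental
-- negative-slice matches can differ from B's empty occurrence lists.
def Pre_mapping_info (AnchorInfo : List (String × List (String × String))) (contig : String) (k : Int) : Prop :=
  (0 ≤ k ∨ AnchorInfo.all (fun p => !(PySem.Str.isIn (pvSeqOf p.2) contig)) = true) ∧
  (AnchorInfo.map Prod.fst).Nodup ∧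
  AnchorInfo.all (fun p => (p.2.find? (fun q => q.1 == "seq")).isSome && pvACGT (pvSeqOf p.2)) = true

instance (AnchorInfo : List (String × List (String × String))) (contig : String) (k : Int) : Decidable (Pre_mapping_info AnchorInfo contig k) := by unfold Pre_mapping_info; infer_instance

def pvWitness_mapping_info : (List (String × List (String × String))) × String × Int :=
  ([("a", [("seq", "AC")]), ("b", [("seq", "GAC")])], "GACAC", 2)

def Spec_mapping_info (AnchorInfo : List (String × List (String × String))) (contig : String) (k : Int) (out : (List (String × Int)) × (List (String × List Int))) : Prop := out = mapping_info_alt AnchorInfo contig k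
instance (AnchorInfo : List (String × List (String × String))) (contig : String) (k : Int) (out : (List (String × Int)) × (List (String × List Int))) : Decidable (Spec_mapping_info AnchorInfo contig k out) := by unfold Spec_mapping_info; infer_instance

-- ===== CLAIM (what is proved, stated in full; the proofs are below) =====
def Claim_equal_mapping_info : Prop := ∀ (AnchorInfo : List (String × List (String × String))) (contig : String) (k : Int), Dom_mapping_info AnchorInfo contig k → Pre_mapping_info AnchorInfo contig k → Spec_mapping_info AnchorInfo contig k (mapping_info AnchorInfo contig k)


-- ===== LEMMAS AND PROOFS =====

-- first-match lookup in an association list with distinct keys finds the member itself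
theorem pv_find?_eq_of_mem {p : String × List (String × String)}
    {l : List (String × List (String × String))}
    (hm : p ∈ l) (hnd : (l.map Prod.fst).Nodup) :
    l.find? (fun q => q.1 == p.1) = some p := by
  induction l with
  | nil => cases hm
  | cons hd tl ih =>
    rcases List.mem_cons.mp hm with rfl | hm'
    · simp [List.find?]
    · have hnd' : hd.1 ∉ tl.map Prod.fst ∧ (tl.map Prod.fst).Nodup := by
        rw [List.map_cons, List.nodup_cons] at hnd; exact hnd
      have hne : ¬ (hd.1 == p.1) = true := by
        intro he
        exact hnd'.1 (beq_iff_eq.mp he ▸ List.mem_map_of_mem hm')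
      have : List.find? (fun q => q.1 == p.1) (hd :: tl) = List.find? (fun q => q.1 == p.1) tl := by
        simp [hne]
      rw [this]
      exact ih hm' hnd'.2

-- keys of the Anchorseq fold
theorem pv_mem_keys_foldl_insert (f : String → String) (l : List String)
    (d : PySem.Dict String String) (x : String) :
    x ∈ (l.foldl (fun d a => d.insert (f a) a) d).keys ↔ x ∈ l.map f ∨ x ∈ d.keys := by
  induction l generalizing d with
  | nil => simp
  | cons hd tl ih =>
    rw [List.foldl_cons, ih]
    rw [PySem.Dict.mem_keys_insert]
    simp only [List.map_cons, List.mem_cons]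
    tauto

-- setdefault with value [] preserves "every stored value is []"
theorem pv_setdefault_inv (d : PySem.Dict (List Char) (List Int))
    (h : ∀ key, d.get? key = none ∨ d.get? key = some []) (k0 : List Char) :
    ∀ key, (d.setdefault k0 []).get? key = none ∨ (d.setdefault k0 []).get? key = some [] := by
  intro key
  by_cases hk : key = k0
  · subst hk
    rw [PySem.Dict.get?_setdefault_self]
    rcases h key with h' | h' <;> simp [h']
  · rw [PySem.Dict.get?_setdefault_of_ne _ _ hk]
    exact h key

-- every value stored by the PositionDict-initialising fold is []
theorem pv_PD0_get? (l : List String) (d : PySem.Dict (List Char) (List Int))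
    (h : ∀ key, d.get? key = none ∨ d.get? key = some [])
    (key : List Char) :
    (l.foldl (fun d s => (d.setdefault s.toList []).setdefault (pvRevComp s.toList) []) d).get? key = none ∨
    (l.foldl (fun d s => (d.setdefault s.toList []).setdefault (pvRevComp s.toList) []) d).get? key = some [] := by
  induction l generalizing d with
  | nil => exact h key
  | cons hd tl ih =>
    rw [List.foldl_cons]
    exact ih _ (pv_setdefault_inv _ (pv_setdefault_inv _ h _) _)

-- the PositionDict-initialising fold never drops a key
theorem pv_PD0_contains_mono (l : List String) (d : PySem.Dict (List Char) (List Int))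
    {key : List Char} (h : d.contains key = true) :
    (l.foldl (fun d s => (d.setdefault s.toList []).setdefault (pvRevComp s.toList) []) d).contains key = true := by
  induction l generalizing d with
  | nil => exact h
  | cons hd tl ih =>
    rw [List.foldl_cons]
    exact ih _ (by simp [PySem.Dict.contains_setdefault, h])

-- the PositionDict-initialising fold registers every seq of the list as a key
theorem pv_PD0_contains (l : List String) (d : PySem.Dict (List Char) (List Int))
    {s : String} (hs : s ∈ l) :
    (l.foldl (fun d s => (d.setdefault s.toList []).setdefault (pvRevComp s.toList) []) d).contains s.toList = true := by
  induction l generalizing d with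
  | nil => cases hs
  | cons hd tl ih =>
    rw [List.foldl_cons]
    rcases List.mem_cons.mp hs with rfl | hs'
    · exact pv_PD0_contains_mono _ _ (by simp [PySem.Dict.contains_setdefault])
    · exact ih _ hs'

-- A's scan: the list stored under an existing key collects exactly the positions whose kmer is that key
theorem pv_scan_getD (c : List Char) (k : Int) (l : List Int)
    (d : PySem.Dict (List Char) (List Int)) (key : List Char) (h : d.contains key = true) :
    (l.foldl (pvScanStep c k) d).getD key [] =
      d.getD key [] ++ l.filter (fun i => PySem.List.slice c (some i) (some (i + k)) == key) := by
  induction l generalizing d with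
  | nil => simp
  | cons i tl ih =>
    rw [List.foldl_cons]
    have hc' : (pvScanStep c k d i).contains key = true := by
      unfold pvScanStep
      split_ifs
      · simp [PySem.Dict.contains_insert, h]
      · exact h
    rw [ih _ hc', List.filter_cons]
    by_cases hkm : PySem.List.slice c (some i) (some (i + k)) = key
    · have hck : d.contains (PySem.List.slice c (some i) (some (i + k))) = true := hkm ▸ h
      have : (pvScanStep c k d i).getD key [] = d.getD key [] ++ [i] := by
        unfold pvScanStep
        rw [if_pos hck, hkm, PySem.Dict.getD_insert_self]
      rw [this, if_pos (by simp [hkm]), List.append_assoc]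
      rfl
    · have : (pvScanStep c k d i).getD key [] = d.getD key [] := by
        unfold pvScanStep
        split
        · exact PySem.Dict.getD_insert_of_ne _ _ _ (fun he => hkm he.symm)
        · rfl
      rw [this, if_neg (by simp [hkm])]

-- pyRange with step 1 over naturals
theorem pv_pyRange_eq_map (a len : Nat) :
    PySem.List.pyRange (a : Int) ((a : Int) + (len : Int)) = (List.range' a len).map (fun (i : Nat) => (i : Int)) := by
  induction len generalizing a with
  | zero =>
    have hnil : PySem.List.pyRange (a : Int) ((a : Int) + ((0 : Nat) : Int)) = [] := by
      rw [List.eq_nil_iff_forall_not_mem]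
      intro x hx
      have := PySem.List.mem_pyRange_one.mp hx
      omega
    rw [hnil]
    simp
  | succ m ih =>
    rw [PySem.List.pyRange_one_cons (by push_cast; omega)]
    have h1 : ((a : Int) + 1) = ((a + 1 : Nat) : Int) := by push_cast; ring
    have h2 : ((a : Int) + ((m + 1 : Nat) : Int)) = ((a + 1 : Nat) : Int) + (m : Nat) := by push_cast; ring
    rw [h1, h2, ih]
    simp [List.range'_succ]

-- CPython: find past the end of the string is -1 (even for the empty pattern)
theorem pv_findFrom_past (c s : List Char) : PySem.Chars.findFrom c s ((c.length : Int) + 1) = -1 := by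
  simp only [PySem.Chars.findFrom]
  norm_num
  intro h
  split_ifs at h <;> omega

-- Source B's find loop enumerates, in increasing order, every i ≥ start where s occurs
theorem pv_findAll_eq (c s : List Char) : ∀ (fuel : Nat) (st : Nat), 1 ≤ st → st ≤ c.length + 1 →
    c.length + 1 - st ≤ fuel →
    pvFindAll c s (st : Int) fuel =
      ((List.range' st (c.length + 1 - st)).filter (fun i => decide (s <+: c.drop i))).map (fun (i : Nat) => (i : Int)) := by
  intro fuel
  induction fuel with
  | zero =>
    intro st h1 h2 h3
    rw [show c.length + 1 - st = 0 by omega, List.range'_zero, List.filter_nil, List.map_nil]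
    rfl
  | succ m ih =>
    intro st h1 h2 h3
    by_cases hend : st = c.length + 1
    · subst hend
      have hff : PySem.Chars.findFrom c s (((c.length + 1 : Nat)) : Int) = -1 := by
        have h := pv_findFrom_past c s
        rwa [show ((c.length : Int) + 1) = (((c.length + 1 : Nat)) : Int) by push_cast; ring] at h
      simp only [pvFindAll, hff]
      rw [show c.length + 1 - (c.length + 1) = 0 by omega, List.range'_zero, List.filter_nil,
        List.map_nil]
      simp
    · have hst : st ≤ c.length := by omega
      have hF := PySem.Chars.findFrom_natCast c s st hst
      simp only [pvFindAll]
      by_cases hf : PySem.Chars.find (List.drop st c) s = -1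
      · have hneg : PySem.Chars.findFrom c s (st : Int) = -1 := by rw [hF, if_pos hf]
        rw [hneg, if_pos rfl]
        have hno : ¬ s <:+: List.drop st c := (PySem.Chars.find_eq_neg_one_iff _ _).mp hf
        symm
        rw [List.map_eq_nil_iff, List.filter_eq_nil_iff]
        intro a ha hpa
        have hmem := List.mem_range'_1.mp ha
        apply hno
        have hpre : s <+: List.drop (a - st) (List.drop st c) := by
          rw [List.drop_drop, show st + (a - st) = a by omega]
          exact of_decide_eq_true hpa
        exact hpre.isInfix.trans (List.drop_suffix _ _).isInfix
      · have hf0 : (0 : Int) ≤ PySem.Chars.find (List.drop st c) s := by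
          have hge := PySem.Chars.neg_one_le_find (List.drop st c) s
          omega
        have hspec := PySem.Chars.find_spec (s := List.drop st c) (sub := s) hf0
        have hflen : PySem.Chars.find (List.drop st c) s ≤ ((List.drop st c).length : Int) :=
          PySem.Chars.find_le_length _ _
        have hdlen : (List.drop st c).length = c.length - st := List.length_drop
        set j := st + (PySem.Chars.find (List.drop st c) s).toNat with hjdef
        have hj1 : ((st : Int) + PySem.Chars.find (List.drop st c) s) = (j : Int) := by
          rw [hjdef]; push_cast [Int.toNat_of_nonneg hf0]; ring
        have hjle : j ≤ c.length := by omega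
        have hpos : PySem.Chars.findFrom c s (st : Int) = (j : Int) := by
          rw [hF, if_neg hf, hj1]
        rw [hpos, if_neg (by omega), show ((j : Int) + 1) = (((j + 1 : Nat)) : Int) by push_cast; ring,
          ih (j + 1) (by omega) (by omega) (by omega)]
        have hpj : s <+: List.drop j c := by
          have h := hspec.1
          rwa [List.drop_drop] at h
        have hmin : ∀ i, st ≤ i → i < j → ¬ s <+: List.drop i c := by
          intro i hi1 hi2 hp
          apply hspec.2 (i - st) (by omega)
          rw [List.drop_drop, show st + (i - st) = i by omega]
          exact hp
        have hsplit : List.range' st (c.length + 1 - st) =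
            List.range' st (j - st) ++ j :: List.range' (j + 1) (c.length - j) := by
          have happ := List.range'_append (s := st) (m := j - st) (n := c.length + 1 - j) (step := 1)
          rw [show st + 1 * (j - st) = j by omega] at happ
          rw [show c.length + 1 - st = (j - st) + (c.length + 1 - j) by omega, ← happ,
            show c.length + 1 - j = (c.length - j) + 1 by omega, List.range'_succ]
        rw [hsplit, List.filter_append, List.filter_cons]
        have hfilter1 : List.filter (fun i => decide (s <+: c.drop i)) (List.range' st (j - st)) = [] := by
          rw [List.filter_eq_nil_iff]
          intro a ha hpa
          have hmem := List.mem_range'_1.mp ha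
          exact hmin a hmem.1 (by omega) (of_decide_eq_true hpa)
        rw [hfilter1, if_pos (decide_eq_true hpj), List.nil_append, List.map_cons,
          show c.length + 1 - (j + 1) = c.length - j by omega]

-- any slice of a list is an infix of it
theorem pv_slice_infix {α : Type} (xs : List α) (a b : Option Int) :
    PySem.List.slice xs a b <:+: xs := by
  unfold PySem.List.slice
  exact (List.take_prefix _ _).isInfix.trans (List.drop_suffix _ _).isInfix

-- B's occurrence list is exactly A's filtered position range (k ≥ 0)
theorem pv_occ_eq (c s : List Char) (k : Int) (hk : 0 ≤ k) :
    pvOccurrences c s k =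
      (PySem.List.pyRange 1 ((c.length : Int) - k + 1)).filter
        (fun i => PySem.List.slice c (some i) (some (i + k)) == s) := by
  obtain ⟨kt, rfl⟩ : ∃ kt : Nat, k = (kt : Int) := ⟨k.toNat, by omega⟩
  -- the scanned position range, as a Nat range
  have hR : PySem.List.pyRange 1 ((c.length : Int) - (kt : Int) + 1) =
      (List.range' 1 (c.length - kt)).map (fun (i : Nat) => (i : Int)) := by
    by_cases hkn : kt ≤ c.length
    · have h1 : ((c.length : Int) - (kt : Int) + 1) = ((1 : Nat) : Int) + ((c.length - kt : Nat) : Int) := by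
        push_cast [hkn]; omega
      rw [h1]
      exact_mod_cast pv_pyRange_eq_map 1 (c.length - kt)
    · rw [show c.length - kt = 0 by omega, List.range'_zero, List.map_nil,
        List.eq_nil_iff_forall_not_mem]
      intro x hx
      have := PySem.List.mem_pyRange_one.mp hx
      omega
  have hslice : ∀ i : Nat, i + kt ≤ c.length →
      PySem.List.slice c (some (i : Int)) (some ((i : Int) + (kt : Int))) =
        List.take kt (List.drop i c) := by
    intro i _
    rw [show ((i : Int) + (kt : Int)) = (((i + kt : Nat)) : Int) by push_cast; ring,
      PySem.List.slice_natCast, show i + kt - i = kt by omega]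
  rw [hR, List.filter_map]
  by_cases hlen : s.length = kt
  · -- the guard len(s) != k is false: B runs the find loop
    have hfa := pv_findAll_eq c s (c.length + 1) 1 (by omega) (by omega) (by omega)
    rw [show (((1 : Nat)) : Int) = (1 : Int) by norm_num, show c.length + 1 - 1 = c.length by omega] at hfa
    rw [pvOccurrences, if_neg (by omega : ¬ ((s.length : Int) ≠ (kt : Int))), hfa]
    congr 1
    have hsplit : List.range' 1 c.length =
        List.range' 1 (c.length - kt) ++
          List.range' (1 + (c.length - kt)) (c.length - (c.length - kt)) := by
      have happ := List.range'_append (s := 1) (m := c.length - kt)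
        (n := c.length - (c.length - kt)) (step := 1)
      rw [show 1 + 1 * (c.length - kt) = 1 + (c.length - kt) by omega] at happ
      rw [happ, show (c.length - kt) + (c.length - (c.length - kt)) = c.length by omega]
    rw [hsplit, List.filter_append]
    have h2nil : List.filter (fun i => decide (s <+: c.drop i))
        (List.range' (1 + (c.length - kt)) (c.length - (c.length - kt))) = [] := by
      rw [List.filter_eq_nil_iff]
      intro a ha hpa
      have hmem := List.mem_range'_1.mp ha
      have hle := (of_decide_eq_true hpa).length_le
      rw [List.length_drop] at hle
      omega
    rw [h2nil, List.append_nil]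
    apply List.filter_congr
    intro i hi
    have hmem := List.mem_range'_1.mp hi
    have hikn : i + kt ≤ c.length := by omega
    simp only [Function.comp_apply]
    rw [hslice i hikn]
    by_cases hp : s <+: List.drop i c
    · have ht := List.prefix_iff_eq_take.mp hp
      rw [hlen] at ht
      simp [hp, ← ht]
    · have hne : List.take kt (List.drop i c) ≠ s := by
        intro he
        exact hp (he ▸ List.take_prefix _ _)
      simp only [hp, decide_false]
      symm
      rw [beq_eq_false_iff_ne]
      exact hne
  · -- the guard is true: B returns []; no window of length k can equal s
    rw [pvOccurrences, if_pos (by omega : (s.length : Int) ≠ (kt : Int))]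
    symm
    rw [List.map_eq_nil_iff, List.filter_eq_nil_iff]
    intro a ha hpa
    have hmem := List.mem_range'_1.mp ha
    have hikn : a + kt ≤ c.length := by omega
    simp only [Function.comp_apply] at hpa
    rw [hslice a hikn] at hpa
    have he := beq_iff_eq.mp hpa
    have hlt : (List.take kt (List.drop a c)).length = kt := by
      rw [List.length_take, List.length_drop]
      omega
    rw [he] at hlt
    exact hlen hlt

-- for k < 0 a seq that does not occur in contig is never matched by A's scan; B's guard returns []
theorem pv_occ_eq_neg (c s : List Char) (k : Int) (hk : k < 0) (hinf : ¬ s <:+: c) :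
    pvOccurrences c s k =
      (PySem.List.pyRange 1 ((c.length : Int) - k + 1)).filter
        (fun i => PySem.List.slice c (some i) (some (i + k)) == s) := by
  rw [pvOccurrences, if_pos (by omega : (s.length : Int) ≠ k)]
  symm
  rw [List.filter_eq_nil_iff]
  intro a _ hpa
  exact hinf (beq_iff_eq.mp hpa ▸ pv_slice_infix c (some a) (some (a + k)))

-- the two programs agree anchor by anchor: A's dict entry for a seq is B's occurrence list
theorem pv_main (AnchorInfo : List (String × List (String × String))) (contig : String) (k : Int)
    (hk : 0 ≤ k ∨ AnchorInfo.all (fun p => !(PySem.Str.isIn (pvSeqOf p.2) contig)) = true)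
    (hnd : (AnchorInfo.map Prod.fst).Nodup) :
    mapping_info AnchorInfo contig k = mapping_info_alt AnchorInfo contig k := by
  have hpos : ∀ p ∈ AnchorInfo,
      (((PySem.List.pyRange 1 ((contig.toList.length : Int) - k + 1)).foldl
          (pvScanStep contig.toList k)
          (((((PySem.Dict.mk AnchorInfo).keys).foldl
               (fun d anchor =>
                 d.insert (pvSeqOf (((PySem.Dict.mk AnchorInfo).get? anchor).getD [])) anchor)
               PySem.Dict.empty).keys).foldl
             (fun d s => (d.setdefault s.toList []).setdefault (pvRevComp s.toList) [])
             PySem.Dict.empty)).getD (pvSeqOf p.2).toList [])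
        = pvOccurrences contig.toList (pvSeqOf p.2).toList k := by
    intro p hp
    have hget : (PySem.Dict.mk AnchorInfo).get? p.1 = some p.2 := by
      simp [PySem.Dict.get?, pv_find?_eq_of_mem hp hnd]
    have hkeys : (PySem.Dict.mk AnchorInfo).keys = AnchorInfo.map Prod.fst := by
      simp [PySem.Dict.keys]
    have hmemseq : pvSeqOf p.2 ∈ ((PySem.Dict.mk AnchorInfo).keys).map
        (fun a => pvSeqOf (((PySem.Dict.mk AnchorInfo).get? a).getD [])) := by
      rw [hkeys]
      exact List.mem_map.mpr ⟨p.1, List.mem_map_of_mem hp, by simp [hget]⟩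
    have hmemkeys : pvSeqOf p.2 ∈ ((((PySem.Dict.mk AnchorInfo).keys).foldl
        (fun d anchor => d.insert (pvSeqOf (((PySem.Dict.mk AnchorInfo).get? anchor).getD [])) anchor)
        PySem.Dict.empty).keys) :=
      (pv_mem_keys_foldl_insert _ _ _ _).mpr (Or.inl hmemseq)
    have hcont := pv_PD0_contains _ PySem.Dict.empty hmemkeys
    have hget0 : ((((((PySem.Dict.mk AnchorInfo).keys).foldl
        (fun d anchor => d.insert (pvSeqOf (((PySem.Dict.mk AnchorInfo).get? anchor).getD [])) anchor)
        PySem.Dict.empty).keys).foldl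
        (fun d s => (d.setdefault s.toList []).setdefault (pvRevComp s.toList) [])
        (PySem.Dict.empty : PySem.Dict (List Char) (List Int)))).getD (pvSeqOf p.2).toList [] = [] := by
      rcases pv_PD0_get? ((((PySem.Dict.mk AnchorInfo).keys).foldl
            (fun d anchor =>
              d.insert (pvSeqOf (((PySem.Dict.mk AnchorInfo).get? anchor).getD [])) anchor)
            PySem.Dict.empty).keys) PySem.Dict.empty
          (fun key => Or.inl (by simp [PySem.Dict.get?, PySem.Dict.empty])) (pvSeqOf p.2).toList
        with h' | h' <;>
        simp only [PySem.Dict.getD, h', Option.getD_none, Option.getD_some]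
    rw [pv_scan_getD _ _ _ _ _ hcont, hget0, List.nil_append]
    by_cases hk0 : 0 ≤ k
    · exact (pv_occ_eq contig.toList (pvSeqOf p.2).toList k hk0).symm
    · have hnin := hk.resolve_left hk0
      rw [List.all_eq_true] at hnin
      have hinf : ¬ (pvSeqOf p.2).toList <:+: contig.toList :=
        (PySem.Chars.isIn_eq_false_iff _ _).mp
          (by simpa [PySem.Str.isIn, Bool.not_eq_true'] using hnin p hp)
      exact (pv_occ_eq_neg contig.toList (pvSeqOf p.2).toList k (by omega) hinf).symm
  have hfold :
      AnchorInfo.foldl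
        (fun acc p => pvClassStep acc p.1
          ((((PySem.List.pyRange 1 ((contig.toList.length : Int) - k + 1)).foldl
              (pvScanStep contig.toList k)
              (((((PySem.Dict.mk AnchorInfo).keys).foldl
                   (fun d anchor =>
                     d.insert (pvSeqOf (((PySem.Dict.mk AnchorInfo).get? anchor).getD [])) anchor)
                   PySem.Dict.empty).keys).foldl
                 (fun d s => (d.setdefault s.toList []).setdefault (pvRevComp s.toList) [])
                 PySem.Dict.empty))).getD (pvSeqOf p.2).toList []))
        (PySem.Dict.empty, PySem.Dict.empty)
      = AnchorInfo.foldl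
        (fun acc p => pvClassStep acc p.1 (pvOccurrences contig.toList (pvSeqOf p.2).toList k))
        (PySem.Dict.empty, PySem.Dict.empty) :=
    PySem.List.foldl_congr_mem _ _ _ _ (fun acc p hp => by rw [hpos p hp])
  simp only [mapping_info, mapping_info_alt]
  rw [hfold]

-- ===== VERDICT (by name: the statement is the Claim_ definition above) =====
theorem mapping_info_spec : Claim_equal_mapping_info := by
  intro AnchorInfo contig k _ hpre
  unfold Spec_mapping_info
  exact pv_main AnchorInfo contig k hpre.1 hpre.2.1
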